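-- pv_equiv track=rewrite | github.com/samudraneel05/codeforces | mocha.py | functionsamp
-- ===== SOURCE A (Python) =====
-- def functionsamp(nums, queries):
--     n = len(nums)
--     answer = []
--     for query in queries:
--         if query[0] == 2:
--             nums[query[1]] = query[2]
--         if query[0] == 1:
--             count = 0
--             for i in range(query[1]+1, query[2]):
--                 if nums[i-1] < nums[i] > nums[i+1]:
--                     count += 1
--             answer.append(count)
--     return answer
-- ===== SOURCE B (Python) =====
-- def functionsamp(nums, queries):
--     # Maintain a prefix-count table of peak positions; type-1 queries become
--     # one subtraction, type-2 updates rebuild the table in one linear pass.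
--     # Mutates nums in place exactly like the original.
--     n = len(nums)
--
--     def is_peak(i):
--         return 1 if 0 < i < n - 1 and nums[i - 1] < nums[i] > nums[i + 1] else 0
--
--     def build_prefix():
--         # prefix[k] = number of peak positions strictly below k
--         prefix = [0]
--         acc = 0
--         for i in range(n):
--             acc += is_peak(i)
--             prefix.append(acc)
--         return prefix
--
--     prefix = build_prefix()
--     answer = []
--     for q in queries:
--         if q[0] == 2:
--             nums[q[1]] = q[2]
--             prefix = build_prefix()
--         elif q[0] == 1:
--             l, r = q[1], q[2]
--             answer.append(prefix[r] - prefix[l + 1] if l + 1 < r else 0)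
--     return answer
-- ===== Notes on version B (the rewrite author's own statement) =====
-- stated objective: alternative
-- what changed: B precomputes a prefix-count table of peak positions (rebuilt in one linear pass on each point update), so every type-1 range query becomes a single subtraction instead of A's per-query scan of the range.
-- outside the precondition, e.g. on functionsamp([5, 1, 2], [[1, -1, 2]]): A returns [1], B returns [0]
import Mathlib
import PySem

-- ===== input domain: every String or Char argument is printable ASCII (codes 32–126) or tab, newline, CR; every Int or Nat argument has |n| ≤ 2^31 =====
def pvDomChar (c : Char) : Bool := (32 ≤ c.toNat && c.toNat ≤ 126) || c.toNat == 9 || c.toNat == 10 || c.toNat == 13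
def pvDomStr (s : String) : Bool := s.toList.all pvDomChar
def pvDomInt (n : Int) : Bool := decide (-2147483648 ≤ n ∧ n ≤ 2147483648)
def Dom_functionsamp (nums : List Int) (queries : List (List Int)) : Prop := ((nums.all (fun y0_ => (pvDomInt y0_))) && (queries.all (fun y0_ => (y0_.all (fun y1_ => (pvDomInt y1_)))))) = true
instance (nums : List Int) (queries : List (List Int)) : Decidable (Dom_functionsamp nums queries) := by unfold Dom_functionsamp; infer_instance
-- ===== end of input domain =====

-- B maintains a prefix-count table of peaks (rebuilt linearly on each update) so a
-- range query is one subtraction; both A and B mutate `nums` in place the same way,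
-- the equivalence proved here is about the return value.

-- ===== PORT A =====
-- inner loop of a type-1 query: count i in range(l+1, r) with nums[i-1] < nums[i] > nums[i+1]
def aInner (nums : List Int) (l r : Int) : Int :=
  (PySem.List.pyRange (l + 1) r 1).foldl (fun count i =>
    if PySem.List.pyGetD nums (i - 1) 0 < PySem.List.pyGetD nums i 0 ∧
       PySem.List.pyGetD nums (i + 1) 0 < PySem.List.pyGetD nums i 0
    then count + 1 else count) 0

def stepA (st : List Int × List Int) (query : List Int) : List Int × List Int :=
  let nums1 := if PySem.List.pyGetD query 0 0 = 2 then
      PySem.List.pySetD st.1 (PySem.List.pyGetD query 1 0) (PySem.List.pyGetD query 2 0)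
    else st.1
  let answer1 := if PySem.List.pyGetD query 0 0 = 1 then
      st.2 ++ [aInner nums1 (PySem.List.pyGetD query 1 0) (PySem.List.pyGetD query 2 0)]
    else st.2
  (nums1, answer1)

def functionsamp (nums : List Int) (queries : List (List Int)) : List Int :=
  (queries.foldl stepA (nums, ([] : List Int))).2

-- ===== PORT B =====
def bIsPeak (n : Nat) (arr : List Int) (i : Int) : Int :=
  if 0 < i ∧ i < (n : Int) - 1 ∧
     PySem.List.pyGetD arr (i - 1) 0 < PySem.List.pyGetD arr i 0 ∧
     PySem.List.pyGetD arr (i + 1) 0 < PySem.List.pyGetD arr i 0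
  then 1 else 0

-- build_prefix: prefix[k] = number of peak positions strictly below k
def bBuild (n : Nat) (arr : List Int) : List Int :=
  ((PySem.List.pyRange 0 (n : Int) 1).foldl (fun st i =>
    (st.1 ++ [st.2 + bIsPeak n arr i], st.2 + bIsPeak n arr i)) (([0] : List Int), (0 : Int))).1

def stepB (n : Nat) (st : List Int × List Int × List Int) (q : List Int) :
    List Int × List Int × List Int :=
  if PySem.List.pyGetD q 0 0 = 2 then
    let arr := PySem.List.pySetD st.1 (PySem.List.pyGetD q 1 0) (PySem.List.pyGetD q 2 0)
    (arr, bBuild n arr, st.2.2)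
  else if PySem.List.pyGetD q 0 0 = 1 then
    let l := PySem.List.pyGetD q 1 0
    let r := PySem.List.pyGetD q 2 0
    (st.1, st.2.1, st.2.2 ++
      [if l + 1 < r then PySem.List.pyGetD st.2.1 r 0 - PySem.List.pyGetD st.2.1 (l + 1) 0 else 0])
  else st

def functionsamp_alt (nums : List Int) (queries : List (List Int)) : List Int :=
  let n := nums.length
  (queries.foldl (stepB n) (nums, bBuild n nums, ([] : List Int))).2.2

-- ===== PRECONDITION & SPEC =====
-- per-query condition, n = len(nums)
abbrev PreQ (n : Nat) (q : List Int) : Prop :=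
  1 ≤ q.length ∧
  (PySem.List.pyGetD q 0 0 = 2 → 3 ≤ q.length ∧
    -(n : Int) ≤ PySem.List.pyGetD q 1 0 ∧ PySem.List.pyGetD q 1 0 < (n : Int)) ∧
  (PySem.List.pyGetD q 0 0 = 1 → 3 ≤ q.length ∧
    0 ≤ PySem.List.pyGetD q 1 0 ∧
    ((0 ≤ PySem.List.pyGetD q 2 0 ∧ PySem.List.pyGetD q 2 0 ≤ (n : Int) - 1) ∨
      PySem.List.pyGetD q 2 0 ≤ PySem.List.pyGetD q 1 0 + 1))
-- Pre_ excludes queries shorter than 3 elements, update indices outside [-n, n)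
-- (IndexError in A), and range queries whose bounds leave [0, n) while the scanned
-- range is nonempty: there A raises IndexError or, for a negative left bound,
-- silently wraps around via Python's negative indexing, which B does not reproduce.
def Pre_functionsamp (nums : List Int) (queries : List (List Int)) : Prop :=
  ∀ q ∈ queries, PreQ nums.length q
instance (nums : List Int) (queries : List (List Int)) : Decidable (Pre_functionsamp nums queries) := by
  unfold Pre_functionsamp; infer_instance

def pvWitness_functionsamp : List Int × List (List Int) :=
  ([1, 3, 2], [[1, 0, 2], [2, 1, 0], [1, 0, 2]])

def Spec_functionsamp (nums : List Int) (queries : List (List Int)) (out : List Int) : Prop := out = functionsamp_alt nums queries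
instance (nums : List Int) (queries : List (List Int)) (out : List Int) : Decidable (Spec_functionsamp nums queries out) := by unfold Spec_functionsamp; infer_instance

-- ===== CLAIM (what is proved, stated in full; the proofs are below) =====
def Claim_equal_functionsamp : Prop := ∀ (nums : List Int) (queries : List (List Int)), Dom_functionsamp nums queries → Pre_functionsamp nums queries → Spec_functionsamp nums queries (functionsamp nums queries)

-- ===== LEMMAS AND PROOFS =====


-- number of peak positions strictly below k
def pref (n : Nat) (arr : List Int) (k : Nat) : Int :=
  ((List.range k).map (fun i => bIsPeak n arr (i : Int))).sum

lemma pref_succ (n : Nat) (arr : List Int) (k : Nat) :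
    pref n arr (k + 1) = pref n arr k + bIsPeak n arr (k : Int) := by
  simp [pref, List.range_succ]

lemma bBuild_eq (n : Nat) (arr : List Int) :
    bBuild n arr = (List.range (n + 1)).map (fun k => pref n arr k) := by
  have key : ∀ m : Nat,
      (List.range m).foldl
        (fun st (i : Nat) => (st.1 ++ [st.2 + bIsPeak n arr (i : Int)], st.2 + bIsPeak n arr (i : Int)))
        (([0] : List Int), (0 : Int))
      = ((List.range (m + 1)).map (fun k => pref n arr k), pref n arr m) := by
    intro m
    induction m with
    | zero => simp [pref]
    | succ m ih =>
      rw [List.range_succ, List.foldl_append, ih]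
      simp only [List.foldl_cons, List.foldl_nil]
      rw [← pref_succ]
      simp [List.range_succ]
  unfold bBuild
  rw [PySem.List.pyRange_zero_nat, List.foldl_map, key]

lemma aInner_count (n : Nat) (arr : List Int) (a b : Int) (c0 : Int)
    (h1 : 1 ≤ a) (h2 : a ≤ b) (h3 : b ≤ (n : Int) - 1) :
    (PySem.List.pyRange a b 1).foldl (fun count i =>
      if PySem.List.pyGetD arr (i - 1) 0 < PySem.List.pyGetD arr i 0 ∧
         PySem.List.pyGetD arr (i + 1) 0 < PySem.List.pyGetD arr i 0
      then count + 1 else count) c0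
    = c0 + (pref n arr b.toNat - pref n arr a.toNat) := by
  have key : ∀ t : Nat, a + (t : Int) ≤ (n : Int) - 1 →
      (PySem.List.pyRange a (a + (t : Int)) 1).foldl (fun count i =>
        if PySem.List.pyGetD arr (i - 1) 0 < PySem.List.pyGetD arr i 0 ∧
           PySem.List.pyGetD arr (i + 1) 0 < PySem.List.pyGetD arr i 0
        then count + 1 else count) c0
      = c0 + (pref n arr (a + (t : Int)).toNat - pref n arr a.toNat) := by
    intro t
    induction t with
    | zero =>
      intro _
      rw [show a + ((0 : Nat) : Int) = a from by push_cast; ring]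
      rw [PySem.List.pyRange_one_eq_nil (le_refl a)]
      simp
    | succ t ih =>
      intro ht
      have hstep : a + ((t + 1 : Nat) : Int) = (a + (t : Int)) + 1 := by push_cast; ring
      rw [hstep] at ht ⊢
      rw [PySem.List.pyRange_one_succ_right (by omega), List.foldl_append, ih (by omega)]
      simp only [List.foldl_cons, List.foldl_nil]
      have htn : ((a + (t : Int)) + 1).toNat = (a + (t : Int)).toNat + 1 := by omega
      rw [htn, pref_succ]
      have hcast : (((a + (t : Int)).toNat : Int)) = a + (t : Int) := by omega
      rw [hcast]
      have hpk : bIsPeak n arr (a + (t : Int)) =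
          if PySem.List.pyGetD arr (a + (t : Int) - 1) 0 < PySem.List.pyGetD arr (a + (t : Int)) 0 ∧
             PySem.List.pyGetD arr (a + (t : Int) + 1) 0 < PySem.List.pyGetD arr (a + (t : Int)) 0
          then 1 else 0 := by
        unfold bIsPeak
        have hb1 : (0 : Int) < a + (t : Int) := by omega
        have hb2 : a + (t : Int) < (n : Int) - 1 := by omega
        simp [hb1, hb2]
      rw [hpk]
      split_ifs with h <;> ring
  have hb : b = a + ((b - a).toNat : Int) := by omega
  rw [hb] at h3 ⊢
  exact key (b - a).toNat h3

lemma query_eq (n : Nat) (arr : List Int) (l r : Int)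
    (hl : 0 ≤ l) (hcase : (0 ≤ r ∧ r ≤ (n : Int) - 1) ∨ r ≤ l + 1) :
    aInner arr l r =
      (if l + 1 < r then PySem.List.pyGetD (bBuild n arr) r 0 -
        PySem.List.pyGetD (bBuild n arr) (l + 1) 0 else 0) := by
  by_cases h : l + 1 < r
  · obtain ⟨hr0, hr⟩ : 0 ≤ r ∧ r ≤ (n : Int) - 1 := by rcases hcase with h' | h' <;> omega
    rw [if_pos h]
    unfold aInner
    rw [aInner_count n arr (l + 1) r 0 (by omega) (by omega) hr]
    rw [bBuild_eq]
    rw [PySem.List.pyGetD_eq_getElem _ 0 hr0 (by simp; omega)]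
    rw [PySem.List.pyGetD_eq_getElem _ 0 (by omega) (by simp; omega)]
    simp only [List.getElem_map, List.getElem_range]
    ring
  · rw [if_neg h]
    unfold aInner
    rw [PySem.List.pyRange_one_eq_nil (by omega)]
    rfl

lemma loop_eq (n : Nat) (queries : List (List Int)) :
    ∀ (arr ans : List Int), arr.length = n →
    (∀ q ∈ queries, PreQ n q) →
    (queries.foldl stepA (arr, ans)).2
      = (queries.foldl (stepB n) (arr, bBuild n arr, ans)).2.2 := by
  induction queries with
  | nil => intro arr ans _ _; rfl
  | cons q qs ih =>
    intro arr ans hlen hpre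
    have hq := hpre q (List.mem_cons_self)
    have hqs : ∀ p ∈ qs, PreQ n p := fun p hp => hpre p (List.mem_cons_of_mem q hp)
    simp only [List.foldl_cons]
    by_cases h2 : PySem.List.pyGetD q 0 0 = 2
    · have h1 : ¬ PySem.List.pyGetD q 0 0 = 1 := by rw [h2]; decide
      simp only [stepA, stepB, h2, if_pos]
      exact ih _ ans (by rw [PySem.List.length_pySetD]; exact hlen) hqs
    · by_cases h1 : PySem.List.pyGetD q 0 0 = 1
      · obtain ⟨_, _, hb⟩ := hq
        obtain ⟨_, hl, hcase⟩ := hb h1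
        simp only [stepA, stepB, h1]
        norm_num
        rw [query_eq n arr (PySem.List.pyGetD q 1 0) (PySem.List.pyGetD q 2 0) hl hcase]
        exact ih arr _ hlen hqs
      · simp only [stepA, stepB, h2, h1]
        exact ih arr ans hlen hqs

-- ===== VERDICT (by name: the statement is the Claim_ definition above) =====
theorem functionsamp_spec : Claim_equal_functionsamp := by
  intro nums queries _ hpre
  unfold Spec_functionsamp functionsamp functionsamp_alt
  exact loop_eq nums.length queries nums [] rfl hpre
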